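-- pv_equiv track=rewrite | github.com/isamadrind/certificate-generate-pro.v3.01 | app.py | get_invite_phrase
-- ===== SOURCE A (Python) =====
-- def get_invite_phrase(category):
--     c = category.lower()
--     if any(x in c for x in ["teacher","professor","faculty","lecturer","principal"]):
--         return "You are cordially invited as"
--     elif any(x in c for x in ["speaker","keynote","presenter"]):
--         return "We are honored to welcome"
--     elif any(x in c for x in ["chief","director","ceo","vip","guest of honor"]):
--         return "It is our privilege to invite"
--     elif any(x in c for x in ["judge","panelist","reviewer","evaluator"]):
--         return "You are invited to serve as"
--     elif any(x in c for x in ["business","entrepreneur","sponsor","investor","industry"]):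
--         return "We are pleased to welcome"
--     elif any(x in c for x in ["management","organizer","volunteer","coordinator"]):
--         return "You are invited to participate as"
--     elif any(x in c for x in ["alumni","graduate","ex-student"]):
--         return "We warmly welcome our distinguished alumnus"
--     else:
--         return "We are pleased to invite"
-- ===== SOURCE B (Python) =====
-- # Flat keyword -> group-index map; one pass keeps the minimum matched group
-- # index (default 7 = fallback), then a phrase table is indexed once.
-- KEYWORD_GROUP = {
--     "teacher": 0, "professor": 0, "faculty": 0, "lecturer": 0, "principal": 0,
--     "speaker": 1, "keynote": 1, "presenter": 1,
--     "chief": 2, "director": 2, "ceo": 2, "vip": 2, "guest of honor": 2,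
--     "judge": 3, "panelist": 3, "reviewer": 3, "evaluator": 3,
--     "business": 4, "entrepreneur": 4, "sponsor": 4, "investor": 4, "industry": 4,
--     "management": 5, "organizer": 5, "volunteer": 5, "coordinator": 5,
--     "alumni": 6, "graduate": 6, "ex-student": 6,
-- }
--
-- PHRASE_BY_GROUP = [
--     "You are cordially invited as",
--     "We are honored to welcome",
--     "It is our privilege to invite",
--     "You are invited to serve as",
--     "We are pleased to welcome",
--     "You are invited to participate as",
--     "We warmly welcome our distinguished alumnus",
--     "We are pleased to invite",
-- ]
--
-- def get_invite_phrase(category):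
--     c = category.lower()
--     best = len(PHRASE_BY_GROUP) - 1
--     for k, i in KEYWORD_GROUP.items():
--         if k in c:
--             best = min(best, i)
--     return PHRASE_BY_GROUP[best]
-- ===== Notes on version B (the rewrite author's own statement) =====
-- stated objective: alternative
-- what changed: Instead of testing keyword groups in order and short-circuiting on the first hit, B flattens all keywords into one keyword->group-index map, computes the minimum matched group index in a single pass over that map, and indexes a phrase table with it (default index = fallback phrase).
import Mathlib
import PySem

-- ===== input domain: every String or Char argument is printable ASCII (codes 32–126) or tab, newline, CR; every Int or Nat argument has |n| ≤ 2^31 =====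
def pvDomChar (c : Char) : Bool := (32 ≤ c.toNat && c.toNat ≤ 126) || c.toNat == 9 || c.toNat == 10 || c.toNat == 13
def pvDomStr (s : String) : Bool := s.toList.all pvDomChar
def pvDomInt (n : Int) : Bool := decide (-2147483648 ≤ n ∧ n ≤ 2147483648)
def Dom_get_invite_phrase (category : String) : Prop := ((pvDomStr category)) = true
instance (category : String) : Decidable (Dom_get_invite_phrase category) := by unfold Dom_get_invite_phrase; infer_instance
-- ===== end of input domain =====

-- B replaces A's ordered first-match group tests by a single pass over a flat
-- keyword→group-index map keeping the minimum matched index, then one table lookup (alternative).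

-- ===== PORT A =====
def get_invite_phrase (category : String) : String :=
  let c := PySem.Str.lower category
  if ["teacher","professor","faculty","lecturer","principal"].any (fun x => PySem.Str.isIn x c) then
    "You are cordially invited as"
  else if ["speaker","keynote","presenter"].any (fun x => PySem.Str.isIn x c) then
    "We are honored to welcome"
  else if ["chief","director","ceo","vip","guest of honor"].any (fun x => PySem.Str.isIn x c) then
    "It is our privilege to invite"
  else if ["judge","panelist","reviewer","evaluator"].any (fun x => PySem.Str.isIn x c) then
    "You are invited to serve as"
  else if ["business","entrepreneur","sponsor","investor","industry"].any (fun x => PySem.Str.isIn x c) then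
    "We are pleased to welcome"
  else if ["management","organizer","volunteer","coordinator"].any (fun x => PySem.Str.isIn x c) then
    "You are invited to participate as"
  else if ["alumni","graduate","ex-student"].any (fun x => PySem.Str.isIn x c) then
    "We warmly welcome our distinguished alumnus"
  else
    "We are pleased to invite"

-- ===== PORT B =====
def KEYWORD_GROUP : List (String × Nat) :=
  [("teacher",0),("professor",0),("faculty",0),("lecturer",0),("principal",0),
   ("speaker",1),("keynote",1),("presenter",1),
   ("chief",2),("director",2),("ceo",2),("vip",2),("guest of honor",2),
   ("judge",3),("panelist",3),("reviewer",3),("evaluator",3),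
   ("business",4),("entrepreneur",4),("sponsor",4),("investor",4),("industry",4),
   ("management",5),("organizer",5),("volunteer",5),("coordinator",5),
   ("alumni",6),("graduate",6),("ex-student",6)]

def PHRASE_BY_GROUP : List String :=
  ["You are cordially invited as",
   "We are honored to welcome",
   "It is our privilege to invite",
   "You are invited to serve as",
   "We are pleased to welcome",
   "You are invited to participate as",
   "We warmly welcome our distinguished alumnus",
   "We are pleased to invite"]

def get_invite_phrase_alt (category : String) : String :=
  let c := PySem.Str.lower category
  let best := KEYWORD_GROUP.foldl
    (fun b p => if PySem.Str.isIn p.1 c then min b p.2 else b)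
    (PHRASE_BY_GROUP.length - 1)
  PHRASE_BY_GROUP.getD best ""

-- ===== PRECONDITION & SPEC =====
def Spec_get_invite_phrase (category : String) (out : String) : Prop := out = get_invite_phrase_alt category
instance (category : String) (out : String) : Decidable (Spec_get_invite_phrase category out) := by unfold Spec_get_invite_phrase; infer_instance

-- ===== CLAIM (what is proved, stated in full; the proofs are below) =====
def Claim_equal_get_invite_phrase : Prop := ∀ (category : String), Dom_get_invite_phrase category → Spec_get_invite_phrase category (get_invite_phrase category)

-- ===== LEMMAS AND PROOFS =====

-- a block of keywords all mapped to the same group index i folds to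
-- "min with i if any keyword matches, unchanged otherwise"
theorem fold_min_group (f : String → Bool) (ks : List String) (i m : Nat) :
    List.foldl (fun b (p : String × Nat) => if f p.1 then min b p.2 else b) m
      (ks.map (fun k => (k, i)))
    = if ks.any f then min m i else m := by
  induction ks generalizing m with
  | nil => simp
  | cons k ks ih =>
    simp only [List.map_cons, List.foldl_cons, List.any_cons]
    rw [ih]
    by_cases hb : f k = true <;> by_cases ha : ks.any f = true <;>
      simp [hb, ha]

theorem kg_split : KEYWORD_GROUP =
    (["teacher","professor","faculty","lecturer","principal"].map (fun k => (k, (0:Nat)))) ++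
    (["speaker","keynote","presenter"].map (fun k => (k, (1:Nat)))) ++
    (["chief","director","ceo","vip","guest of honor"].map (fun k => (k, (2:Nat)))) ++
    (["judge","panelist","reviewer","evaluator"].map (fun k => (k, (3:Nat)))) ++
    (["business","entrepreneur","sponsor","investor","industry"].map (fun k => (k, (4:Nat)))) ++
    (["management","organizer","volunteer","coordinator"].map (fun k => (k, (5:Nat)))) ++
    (["alumni","graduate","ex-student"].map (fun k => (k, (6:Nat)))) := by rfl

-- ===== VERDICT (by name: the statement is the Claim_ definition above) =====
theorem get_invite_phrase_spec : Claim_equal_get_invite_phrase := by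
  intro category _
  unfold Spec_get_invite_phrase
  simp only [get_invite_phrase, get_invite_phrase_alt]
  rw [kg_split]
  rw [List.foldl_append, List.foldl_append, List.foldl_append, List.foldl_append,
      List.foldl_append, List.foldl_append]
  rw [fold_min_group (fun x => PySem.Str.isIn x (PySem.Str.lower category)) ["teacher","professor","faculty","lecturer","principal"] 0]
  rw [fold_min_group (fun x => PySem.Str.isIn x (PySem.Str.lower category)) ["speaker","keynote","presenter"] 1]
  rw [fold_min_group (fun x => PySem.Str.isIn x (PySem.Str.lower category)) ["chief","director","ceo","vip","guest of honor"] 2]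
  rw [fold_min_group (fun x => PySem.Str.isIn x (PySem.Str.lower category)) ["judge","panelist","reviewer","evaluator"] 3]
  rw [fold_min_group (fun x => PySem.Str.isIn x (PySem.Str.lower category)) ["business","entrepreneur","sponsor","investor","industry"] 4]
  rw [fold_min_group (fun x => PySem.Str.isIn x (PySem.Str.lower category)) ["management","organizer","volunteer","coordinator"] 5]
  rw [fold_min_group (fun x => PySem.Str.isIn x (PySem.Str.lower category)) ["alumni","graduate","ex-student"] 6]
  generalize List.any ["teacher","professor","faculty","lecturer","principal"] (fun x => PySem.Str.isIn x (PySem.Str.lower category)) = b1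
  generalize List.any ["speaker","keynote","presenter"] (fun x => PySem.Str.isIn x (PySem.Str.lower category)) = b2
  generalize List.any ["chief","director","ceo","vip","guest of honor"] (fun x => PySem.Str.isIn x (PySem.Str.lower category)) = b3
  generalize List.any ["judge","panelist","reviewer","evaluator"] (fun x => PySem.Str.isIn x (PySem.Str.lower category)) = b4
  generalize List.any ["business","entrepreneur","sponsor","investor","industry"] (fun x => PySem.Str.isIn x (PySem.Str.lower category)) = b5
  generalize List.any ["management","organizer","volunteer","coordinator"] (fun x => PySem.Str.isIn x (PySem.Str.lower category)) = b6
  generalize List.any ["alumni","graduate","ex-student"] (fun x => PySem.Str.isIn x (PySem.Str.lower category)) = b7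
  cases b1 <;> cases b2 <;> cases b3 <;> cases b4 <;> cases b5 <;> cases b6 <;> cases b7 <;> rfl
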